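-- pv_equiv track=rewrite | github.com/springaz/ProjectBM | XOR/Xor.py | MaHoa5
-- ===== SOURCE A (Python) =====
-- def MaHoa5(p, key):
--     ci=""
--     for c in p:
--         if c!=' ':
--             so = ord(c) - 65;
--             so = so ^ key
--             ci += chr(so+ 65)
--         else:
--             ci += c
--     return ci
-- ===== SOURCE B (Python) =====
-- def MaHoa5(p, key):
--     table = {}
--     for c in p:
--         if c != ' ':
--             table[ord(c)] = chr(((ord(c) - 65) ^ key) + 65)
--     return p.translate(table)
-- ===== Notes on version B (the rewrite author's own statement) =====
-- stated objective: idiomatic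
-- what changed: Instead of character-by-character string concatenation in a loop, B builds a translation table (code point -> ciphered char, computed once per character in input order so chr raises identically) and applies str.translate once.
import Mathlib
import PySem

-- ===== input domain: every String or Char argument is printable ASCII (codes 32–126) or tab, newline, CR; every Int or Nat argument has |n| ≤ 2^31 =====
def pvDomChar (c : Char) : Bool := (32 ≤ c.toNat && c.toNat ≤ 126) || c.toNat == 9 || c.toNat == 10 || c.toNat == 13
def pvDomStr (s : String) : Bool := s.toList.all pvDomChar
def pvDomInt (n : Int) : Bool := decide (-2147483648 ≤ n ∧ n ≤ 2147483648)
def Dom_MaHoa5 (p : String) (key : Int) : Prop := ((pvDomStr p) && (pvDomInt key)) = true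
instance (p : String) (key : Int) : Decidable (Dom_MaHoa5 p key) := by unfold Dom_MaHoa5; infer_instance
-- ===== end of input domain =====

-- B replaces A's character-by-character string concatenation with a translation table applied by
-- one translate/map pass (same O(n) cost, more idiomatic); equivalence is about the return value.

-- chr(n): exact whenever n is a valid Lean Char code point (guaranteed by Pre_; Python raises
-- ValueError outside [0, 0x110000))
def pvChr (n : Int) : Char := Char.ofNat n.toNat

-- ===== PORT A =====
def MaHoa5 (p : String) (key : Int) : String :=
  p.toList.foldl
    (fun ci c =>
      if c ≠ ' ' then
        ci.push (pvChr (PySem.Int.bxor ((c.toNat : Int) - 65) key + 65))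
      else
        ci.push c)
    ""

-- ===== PORT B =====
-- Source B keys the table by ord(c); ord is injective on characters, so the port keys by the Char itself.
def pvTable (key : Int) (l : List Char) : PySem.Dict Char Char :=
  l.foldl
    (fun d c =>
      if c ≠ ' ' then d.insert c (pvChr (PySem.Int.bxor ((c.toNat : Int) - 65) key + 65))
      else d)
    PySem.Dict.empty

-- p.translate(table): characters absent from the table map to themselves
def MaHoa5_alt (p : String) (key : Int) : String :=
  let d := pvTable key p.toList
  String.ofList (p.toList.map (fun c => d.getD c c))

-- ===== PRECONDITION & SPEC =====
-- Pre_ excludes inputs where Python's chr raises ValueError (ciphered code point outside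
-- [0, 0x110000)) and, narrowing beyond A's domain, inputs whose ciphered code point is a lone
-- surrogate (U+D800–U+DFFF): Python returns such a string but a Lean Char cannot represent it.
def pvPreChar (key : Int) (c : Char) : Bool :=
  c == ' ' ||
    ((decide (0 ≤ PySem.Int.bxor ((c.toNat : Int) - 65) key + 65) &&
      decide (PySem.Int.bxor ((c.toNat : Int) - 65) key + 65 < 55296)) ||
     (decide (57343 < PySem.Int.bxor ((c.toNat : Int) - 65) key + 65) &&
      decide (PySem.Int.bxor ((c.toNat : Int) - 65) key + 65 < 1114112)))
def Pre_MaHoa5 (p : String) (key : Int) : Prop :=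
  p.toList.all (pvPreChar key) = true
instance (p : String) (key : Int) : Decidable (Pre_MaHoa5 p key) := by
  unfold Pre_MaHoa5; infer_instance

def pvWitness_MaHoa5 : String × Int := ("AB C", 3)

def Spec_MaHoa5 (p : String) (key : Int) (out : String) : Prop := out = MaHoa5_alt p key
instance (p : String) (key : Int) (out : String) : Decidable (Spec_MaHoa5 p key out) := by unfold Spec_MaHoa5; infer_instance

-- ===== CLAIM (what is proved, stated in full; the proofs are below) =====
def Claim_equal_MaHoa5 : Prop := ∀ (p : String) (key : Int), Dom_MaHoa5 p key → Pre_MaHoa5 p key → Spec_MaHoa5 p key (MaHoa5 p key)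

-- ===== LEMMAS AND PROOFS =====

-- the per-character value both programs produce
def pvStep (key : Int) (c : Char) : Char :=
  if c ≠ ' ' then pvChr (PySem.Int.bxor ((c.toNat : Int) - 65) key + 65) else c

-- lookup in the table built by B's first loop
theorem get?_pvTable_aux (key : Int) :
    ∀ (l : List Char) (d : PySem.Dict Char Char) (c : Char),
    (l.foldl
      (fun d c =>
        if c ≠ ' ' then d.insert c (pvChr (PySem.Int.bxor ((c.toNat : Int) - 65) key + 65))
        else d) d).get? c
      = if c ∈ l ∧ c ≠ ' ' then some (pvChr (PySem.Int.bxor ((c.toNat : Int) - 65) key + 65))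
        else d.get? c := by
  intro l
  induction l with
  | nil => intro d c; simp
  | cons x l ih =>
    intro d c
    simp only [List.foldl_cons, ih, List.mem_cons]
    by_cases hmem : c ∈ l ∧ c ≠ ' '
    · simp [hmem]
    · rw [if_neg hmem]
      by_cases hcx : c = x
      · subst hcx
        by_cases hsp : c = ' '
        · simp [hsp]
        · rw [if_pos (show ¬c = ' ' from hsp), PySem.Dict.get?_insert, if_pos rfl,
              if_pos (show (c = c ∨ c ∈ l) ∧ c ≠ ' ' from ⟨Or.inl rfl, hsp⟩)]
      · have hiff : ((c = x ∨ c ∈ l) ∧ c ≠ ' ') ↔ (c ∈ l ∧ c ≠ ' ') := by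
          constructor
          · rintro ⟨h1, h2⟩; exact ⟨h1.resolve_left hcx, h2⟩
          · rintro ⟨h1, h2⟩; exact ⟨Or.inr h1, h2⟩
        rw [if_neg (fun h => hmem (hiff.mp h))]
        by_cases hx : x ≠ ' '
        · rw [if_pos hx, PySem.Dict.get?_insert, if_neg hcx]
        · rw [if_neg hx]

theorem getD_pvTable (key : Int) (l : List Char) (c : Char) (hc : c ∈ l) :
    (pvTable key l).getD c c = pvStep key c := by
  unfold pvTable pvStep
  rw [PySem.Dict.getD_eq_get?_getD, get?_pvTable_aux]
  by_cases h : c ≠ ' '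
  · simp [hc, h]
  · rw [not_not] at h
    simp [h]

-- A's loop appends pvStep of each character
theorem MaHoa5_foldl (key : Int) :
    ∀ (l : List Char) (s : String),
    (l.foldl
      (fun ci c =>
        if c ≠ ' ' then ci.push (pvChr (PySem.Int.bxor ((c.toNat : Int) - 65) key + 65))
        else ci.push c) s).toList
      = s.toList ++ l.map (pvStep key) := by
  intro l
  induction l with
  | nil => intro s; simp
  | cons x l ih =>
    intro s
    have hstep :
        (if x ≠ ' ' then s.push (pvChr (PySem.Int.bxor ((x.toNat : Int) - 65) key + 65))
         else s.push x) = s.push (pvStep key x) := by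
      unfold pvStep; split_ifs <;> rfl
    simp only [List.foldl_cons, List.map_cons, hstep, ih]
    simp

-- ===== VERDICT (by name: the statement is the Claim_ definition above) =====
theorem MaHoa5_spec : Claim_equal_MaHoa5 := by
  intro p key _ _
  unfold Spec_MaHoa5 MaHoa5 MaHoa5_alt
  apply String.toList_inj.mp
  rw [MaHoa5_foldl]
  simp only [String.toList_empty, List.nil_append, String.toList_ofList]
  exact List.map_congr_left fun c hc => (getD_pvTable key p.toList c hc).symm
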